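-- pv_equiv track=rewrite | github.com/McAuley-Lab/RecWizard | src/recwizard/modules/kgsf/utils.py | _edge_list
-- ===== SOURCE A (Python) =====
-- from collections import defaultdict
--
-- def _edge_list(kg, n_entity, hop):
--     edge_list = []
--     for h in range(hop):
--         for entity in range(n_entity):
--             edge_list.append((entity, entity, 185))
--             if entity not in kg:
--                 continue
--             for tail_and_relation in kg[entity]:
--                 if entity != tail_and_relation[1] and tail_and_relation[0] != 185 :
--                     edge_list.append((entity, tail_and_relation[1], tail_and_relation[0]))
--                     edge_list.append((tail_and_relation[1], entity, tail_and_relation[0]))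
--
--     relation_cnt = defaultdict(int)
--     relation_idx = {}
--     for h, t, r in edge_list:
--         relation_cnt[r] += 1
--     for h, t, r in edge_list:
--         if relation_cnt[r] > 1000 and r not in relation_idx:
--             relation_idx[r] = len(relation_idx)
--
--     return [(h, t, relation_idx[r]) for h, t, r in edge_list if relation_cnt[r] > 1000], len(relation_idx)
-- ===== SOURCE B (Python) =====
-- from collections import Counter
--
--
-- def _pairs(entity, rels):
--     out = [(entity, entity, 185)]
--     for r, t in rels:
--         if t != entity and r != 185:
--             out += [(entity, t, r), (t, entity, r)]
--     return out
--
--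
-- def _edge_list(kg, n_entity, hop):
--     # Each hop repeats the same base edge list exactly, so total relation counts
--     # are hop * base counts; nothing survives the threshold when hop <= 0.
--     if hop <= 0:
--         return [], 0
--     base = [x for e in range(n_entity) for x in _pairs(e, kg.get(e, ()))]
--     cnt = Counter(r for _, _, r in base)
--     idx = {}
--     kept = []
--     for h, t, r in base:
--         if hop * cnt[r] > 1000:
--             if r not in idx:
--                 idx[r] = len(idx)
--             kept.append((h, t, idx[r]))
--     return [x for _ in range(hop) for x in kept], len(idx)
-- ===== Notes on version B (the rewrite author's own statement) =====
-- stated objective: faster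
-- what changed: B builds the per-hop base edge list and its relation Counter once, tests the frequency threshold as hop * base_count, assigns relation indices and filters in a single pass over the base, and replicates the filtered list hop times, instead of A's hop-fold construction and three passes over the full replicated list.
import Mathlib
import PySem

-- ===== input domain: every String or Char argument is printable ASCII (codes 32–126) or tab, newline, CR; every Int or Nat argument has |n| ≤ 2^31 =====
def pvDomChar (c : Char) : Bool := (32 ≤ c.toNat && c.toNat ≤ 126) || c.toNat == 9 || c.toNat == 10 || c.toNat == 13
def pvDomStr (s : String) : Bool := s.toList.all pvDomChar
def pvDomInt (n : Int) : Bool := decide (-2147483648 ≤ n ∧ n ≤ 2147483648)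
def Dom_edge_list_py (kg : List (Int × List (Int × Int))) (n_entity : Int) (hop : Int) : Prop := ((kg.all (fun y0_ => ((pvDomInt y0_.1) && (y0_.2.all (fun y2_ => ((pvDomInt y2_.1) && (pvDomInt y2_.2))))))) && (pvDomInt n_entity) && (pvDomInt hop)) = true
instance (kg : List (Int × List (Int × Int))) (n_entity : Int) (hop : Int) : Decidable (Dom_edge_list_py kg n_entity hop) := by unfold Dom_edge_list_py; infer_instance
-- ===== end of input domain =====

-- B builds the per-hop base edge list and its relation counts once, tests the frequency
-- threshold as hop * base_count, filters and reindexes in a single pass over the base and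
-- replicates the result hop times, instead of A's hop-times construction and three passes
-- over the full replicated list (objective: faster).


-- ===== PORT A =====
-- the inner `for tail_and_relation in kg[entity]` loop of A
-- A's append-only edge_list accumulator is carried in REVERSE (cons instead of append)
-- so evaluation stays linear; one List.reverse at the end of elA restores Python's order.
def elA_inner (entity : Int) (rels : List (Int × Int)) (acc : List (Int × Int × Int)) : List (Int × Int × Int) :=
  rels.foldl (fun acc tr =>
    if entity ≠ tr.2 ∧ tr.1 ≠ 185 then (tr.2, entity, tr.1) :: (entity, tr.2, tr.1) :: acc else acc) acc

-- the body of A's `for entity in range(n_entity)` loop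
def elA_entity (kg : List (Int × List (Int × Int))) (acc : List (Int × Int × Int)) (entity : Int) : List (Int × Int × Int) :=
  let acc := (entity, entity, 185) :: acc
  match (PySem.Dict.mk kg).get? entity with
  | none => acc                                -- `if entity not in kg: continue`
  | some rels => elA_inner entity rels acc

-- the doubly nested `for h in range(hop): for entity in range(n_entity)` construction
def elA (kg : List (Int × List (Int × Int))) (n_entity : Int) (hop : Int) : List (Int × Int × Int) :=
  ((PySem.List.pyRange 0 hop 1).foldl (fun acc _h =>
    (PySem.List.pyRange 0 n_entity 1).foldl (elA_entity kg) acc) []).reverse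

def edge_list_py (kg : List (Int × List (Int × Int))) (n_entity : Int) (hop : Int) : (List (Int × Int × Int)) × Int :=
  let el := elA kg n_entity hop
  let cnt : PySem.Dict Int Int :=                                    -- relation_cnt (defaultdict(int))
    el.foldl (fun d x => d.modify x.2.2 0 (· + 1)) PySem.Dict.empty
  let idx : PySem.Dict Int Int :=                                    -- relation_idx
    el.foldl (fun d x =>
      if PySem.Dict.getD cnt x.2.2 0 > 1000 ∧ d.contains x.2.2 = false
      then d.insert x.2.2 (d.size : Int) else d) PySem.Dict.empty
  -- relation_idx[r] in the comprehension: the key is always present when the filter passes,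
  -- so getD _ _ 0 is exact there
  ((el.filter (fun x => decide (PySem.Dict.getD cnt x.2.2 0 > 1000))).map
     (fun x => (x.1, x.2.1, PySem.Dict.getD idx x.2.2 0)),
   (idx.size : Int))

-- ===== PORT B =====
-- B's helper _pairs(entity, rels)
def pairsB (entity : Int) (rels : List (Int × Int)) : List (Int × Int × Int) :=
  rels.foldl (fun out rt =>
    if rt.2 ≠ entity ∧ rt.1 ≠ 185 then out ++ [(entity, rt.2, rt.1), (rt.2, entity, rt.1)] else out)
    [(entity, entity, 185)]

def edge_list_py_alt (kg : List (Int × List (Int × Int))) (n_entity : Int) (hop : Int) : (List (Int × Int × Int)) × Int :=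
  if hop ≤ 0 then ([], 0) else
  let base := (PySem.List.pyRange 0 n_entity 1).flatMap (fun e => pairsB e ((PySem.Dict.mk kg).getD e []))
  let cnt := PySem.Dict.counter (base.map (fun x => x.2.2))
  -- kept is accumulated in reverse (cons, Python's O(1) append) and reversed once below
  let p := base.foldl (fun (p : List (Int × Int × Int) × PySem.Dict Int Int) x =>
      if hop * PySem.Dict.getD cnt x.2.2 0 > 1000 then
        let idx := if p.2.contains x.2.2 then p.2 else p.2.insert x.2.2 (p.2.size : Int)
        ((x.1, x.2.1, PySem.Dict.getD idx x.2.2 0) :: p.1, idx)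
      else p) ([], PySem.Dict.empty)
  let kept := p.1.reverse
  ((PySem.List.pyRange 0 hop 1).flatMap (fun _ => kept), (p.2.size : Int))

-- ===== PRECONDITION & SPEC =====
def Spec_edge_list_py (kg : List (Int × List (Int × Int))) (n_entity : Int) (hop : Int) (out : (List (Int × Int × Int)) × Int) : Prop := out = edge_list_py_alt kg n_entity hop
instance (kg : List (Int × List (Int × Int))) (n_entity : Int) (hop : Int) (out : (List (Int × Int × Int)) × Int) : Decidable (Spec_edge_list_py kg n_entity hop out) := by unfold Spec_edge_list_py; infer_instance

-- ===== CLAIM (what is proved, stated in full; the proofs are below) =====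
def Claim_equal_edge_list_py : Prop := ∀ (kg : List (Int × List (Int × Int))) (n_entity : Int) (hop : Int), Dom_edge_list_py kg n_entity hop → Spec_edge_list_py kg n_entity hop (edge_list_py kg n_entity hop)

-- ===== LEMMAS AND PROOFS =====

-- proof-side vocabulary
def pvG (e : Int) (rt : Int × Int) : List (Int × Int × Int) :=
  if rt.2 ≠ e ∧ rt.1 ≠ 185 then [(e, rt.2, rt.1), (rt.2, e, rt.1)] else []

def pvBase (kg : List (Int × List (Int × Int))) (n_entity : Int) : List (Int × Int × Int) :=
  (PySem.List.pyRange 0 n_entity 1).flatMap (fun e => pairsB e ((PySem.Dict.mk kg).getD e []))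

-- the index-assignment step, generic in the kept-relation predicate P
def pvStepG (P : Int × Int × Int → Prop) [DecidablePred P] (d : PySem.Dict Int Int)
    (x : Int × Int × Int) : PySem.Dict Int Int :=
  if P x then (if d.contains x.2.2 then d else d.insert x.2.2 (d.size : Int)) else d

lemma foldl_revAppend {α β : Type} (g : α → List β) (l : List α) (acc : List β) :
    l.foldl (fun acc x => (g x).reverse ++ acc) acc = (l.flatMap g).reverse ++ acc := by
  induction l generalizing acc with
  | nil => simp
  | cons x l ih => simp [ih, List.append_assoc]

lemma pairsB_eq (e : Int) (rels : List (Int × Int)) :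
    pairsB e rels = (e, e, 185) :: rels.flatMap (pvG e) := by
  unfold pairsB
  have h : (fun (out : List (Int × Int × Int)) (rt : Int × Int) =>
      if rt.2 ≠ e ∧ rt.1 ≠ 185 then out ++ [(e, rt.2, rt.1), (rt.2, e, rt.1)] else out)
      = fun out rt => out ++ pvG e rt := by
    funext out rt; unfold pvG; split <;> simp
  rw [h, PySem.List.foldl_append_eq_flatMap]
  simp

lemma elA_entity_eq (kg : List (Int × List (Int × Int))) (acc : List (Int × Int × Int)) (e : Int) :
    elA_entity kg acc e = (pairsB e ((PySem.Dict.mk kg).getD e [])).reverse ++ acc := by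
  unfold elA_entity
  cases h : (PySem.Dict.mk kg).get? e with
  | none => simp [PySem.Dict.getD, h, pairsB]
  | some rels =>
    simp only [PySem.Dict.getD, h, Option.getD_some]
    unfold elA_inner
    have h2 : (fun (a : List (Int × Int × Int)) (tr : Int × Int) =>
        if e ≠ tr.2 ∧ tr.1 ≠ 185 then (tr.2, e, tr.1) :: (e, tr.2, tr.1) :: a else a)
        = fun a tr => (pvG e tr).reverse ++ a := by
      funext a tr; unfold pvG
      by_cases hc : tr.2 = e
      · rw [if_neg (fun h => h.1 hc.symm), if_neg (fun h => h.1 hc)]; simp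
      · by_cases hc2 : tr.1 = (185 : Int)
        · rw [if_neg (fun h => h.2 hc2), if_neg (fun h => h.2 hc2)]; simp
        · rw [if_pos ⟨fun h => hc h.symm, hc2⟩, if_pos ⟨hc, hc2⟩]; simp
    rw [h2, foldl_revAppend, pairsB_eq]
    simp

lemma elA_eq (kg : List (Int × List (Int × Int))) (n_entity hop : Int) :
    elA kg n_entity hop = (PySem.List.pyRange 0 hop 1).flatMap (fun _ => pvBase kg n_entity) := by
  unfold elA
  have h1 : elA_entity kg = fun acc e => (pairsB e ((PySem.Dict.mk kg).getD e [])).reverse ++ acc := by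
    funext acc e; exact elA_entity_eq kg acc e
  rw [h1]
  have h3 : (fun (acc : List (Int × Int × Int)) (_h : Int) =>
      (PySem.List.pyRange 0 n_entity 1).foldl
        (fun acc e => (pairsB e ((PySem.Dict.mk kg).getD e [])).reverse ++ acc) acc)
      = fun acc _h => ((fun _ : Int => pvBase kg n_entity) _h).reverse ++ acc := by
    funext acc _h
    rw [foldl_revAppend (fun e => pairsB e ((PySem.Dict.mk kg).getD e []))]; rfl
  rw [h3, foldl_revAppend (fun _ : Int => pvBase kg n_entity)]
  simp

lemma count_flatMap_const {α : Type} [BEq α] [LawfulBEq α] (R : List Int) (b : List α) (r : α) :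
    (R.flatMap (fun _ => b)).count r = R.length * b.count r := by
  induction R with
  | nil => simp
  | cons a R ih => simp [List.count_append, ih, Nat.succ_mul, Nat.add_comm]

lemma cntA_getD (kg : List (Int × List (Int × Int))) (n_entity hop : Int) (r : Int) :
    PySem.Dict.getD ((elA kg n_entity hop).foldl (fun d x => d.modify x.2.2 0 (· + 1)) (PySem.Dict.empty : PySem.Dict Int Int)) r 0
      = ((PySem.List.pyRange 0 hop 1).length : Int) * (((pvBase kg n_entity).map (fun y => y.2.2)).count r : Int) := by
  have h : (elA kg n_entity hop).foldl (fun d x => d.modify x.2.2 0 (· + 1)) (PySem.Dict.empty : PySem.Dict Int Int)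
      = PySem.Dict.counter ((elA kg n_entity hop).map (fun y => y.2.2)) := by
    rw [PySem.Dict.counter_eq_foldl, List.foldl_map]
  rw [h, PySem.Dict.getD_counter, elA_eq, List.map_flatMap]
  rw [show (List.flatMap (fun _ => (pvBase kg n_entity).map (fun y => y.2.2)) (PySem.List.pyRange 0 hop 1)).count r
        = (PySem.List.pyRange 0 hop 1).length * ((pvBase kg n_entity).map (fun y => y.2.2)).count r
      from count_flatMap_const _ _ _]
  push_cast
  ring

-- A's threshold test on the full counter agrees with B's `hop * base_count > 1000`
lemma condA_iff (kg : List (Int × List (Int × Int))) (n_entity hop : Int) (x : Int × Int × Int) :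
    PySem.Dict.getD ((elA kg n_entity hop).foldl (fun d x => d.modify x.2.2 0 (· + 1)) (PySem.Dict.empty : PySem.Dict Int Int)) x.2.2 0 > 1000
      ↔ hop * PySem.Dict.getD (PySem.Dict.counter ((pvBase kg n_entity).map (fun y => y.2.2))) x.2.2 0 > 1000 := by
  simp only [cntA_getD, PySem.Dict.getD_counter, PySem.List.length_pyRange_one]
  set c : Int := (((pvBase kg n_entity).map (fun y => y.2.2)).count x.2.2 : Int) with hc
  have hc0 : 0 ≤ c := by rw [hc]; exact Int.natCast_nonneg _
  by_cases h : hop ≤ 0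
  · have h1 : (((hop - 0).toNat : Int)) = 0 := by omega
    rw [h1, zero_mul]
    constructor <;> intro hx <;> nlinarith
  · have h1 : (((hop - 0).toNat : Int)) = hop := by omega
    rw [h1]

lemma contains_foldl_stepG_mono (P : Int × Int × Int → Prop) [DecidablePred P]
    (l : List (Int × Int × Int)) (d : PySem.Dict Int Int) (k : Int) (h : d.contains k = true) :
    (l.foldl (pvStepG P) d).contains k = true := by
  induction l generalizing d with
  | nil => simpa using h
  | cons x l ih =>
    simp only [List.foldl_cons]
    apply ih
    unfold pvStepG
    split_ifs with h1 h2
    · exact h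
    · simp [PySem.Dict.contains_insert, h]
    · exact h

lemma contains_after_pass (P : Int × Int × Int → Prop) [DecidablePred P]
    (l : List (Int × Int × Int)) (d : PySem.Dict Int Int) :
    ∀ x ∈ l, P x → (l.foldl (pvStepG P) d).contains x.2.2 = true := by
  induction l generalizing d with
  | nil => intro x hx; simp at hx
  | cons y l ih =>
    intro x hx hP
    simp only [List.foldl_cons]
    rcases List.mem_cons.mp hx with h | h
    · subst h
      apply contains_foldl_stepG_mono
      unfold pvStepG
      rw [if_pos hP]
      split_ifs with h2
      · exact h2
      · simp
    · exact ih _ _ h hP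

lemma foldl_stepG_noop (P : Int × Int × Int → Prop) [DecidablePred P]
    (l : List (Int × Int × Int)) (d : PySem.Dict Int Int)
    (h : ∀ x ∈ l, P x → d.contains x.2.2 = true) :
    l.foldl (pvStepG P) d = d := by
  induction l with
  | nil => rfl
  | cons x l ih =>
    simp only [List.foldl_cons]
    have hstep : pvStepG P d x = d := by
      unfold pvStepG
      split_ifs with h1 h2
      · rfl
      · exact absurd (h x (List.mem_cons_self) h1) h2
      · rfl
    rw [hstep]
    exact ih (fun y hy hP => h y (List.mem_cons_of_mem _ hy) hP)

lemma get?_foldl_stepG_stable (P : Int × Int × Int → Prop) [DecidablePred P]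
    (l : List (Int × Int × Int)) (d : PySem.Dict Int Int) (k : Int) (h : d.contains k = true) :
    (l.foldl (pvStepG P) d).get? k = d.get? k := by
  induction l generalizing d with
  | nil => rfl
  | cons x l ih =>
    simp only [List.foldl_cons]
    have hcont : (pvStepG P d x).contains k = true := by
      unfold pvStepG
      split_ifs with h1 h2
      · exact h
      · simp [PySem.Dict.contains_insert, h]
      · exact h
    rw [ih _ hcont]
    unfold pvStepG
    split_ifs with h1 h2
    · rfl
    · have hk : k ≠ x.2.2 := by
        intro he; rw [he] at h; rw [h] at h2; exact h2 rfl
      exact PySem.Dict.get?_insert_of_ne _ _ hk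
    · rfl

-- A's `not in`-guarded insertion step IS the generic step
lemma stepA_eq_stepG (P : Int × Int × Int → Prop) [DecidablePred P] :
    (fun (d : PySem.Dict Int Int) (x : Int × Int × Int) =>
      if P x ∧ d.contains x.2.2 = false then d.insert x.2.2 (d.size : Int) else d)
    = pvStepG P := by
  funext d x
  unfold pvStepG
  by_cases hP : P x
  · by_cases hcont : d.contains x.2.2 = true
    · rw [if_neg (by simp [hcont]), if_pos hP, if_pos hcont]
    · have hf : d.contains x.2.2 = false := by simpa using hcont
      rw [if_pos ⟨hP, hf⟩, if_pos hP, if_neg hcont]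
  · rw [if_neg (fun hc => hP hc.1), if_neg hP]

lemma foldl_stepG_flatMap_noop (P : Int × Int × Int → Prop) [DecidablePred P]
    (b : List (Int × Int × Int)) (R : List Int) (d : PySem.Dict Int Int)
    (h : ∀ x ∈ b, P x → d.contains x.2.2 = true) :
    (R.flatMap (fun _ => b)).foldl (pvStepG P) d = d := by
  induction R with
  | nil => rfl
  | cons r R ih =>
    simp only [List.flatMap_cons, List.foldl_append]
    rw [foldl_stepG_noop P b d h]
    exact ih

lemma foldl_stepG_flatMap_const (P : Int × Int × Int → Prop) [DecidablePred P]
    (b : List (Int × Int × Int)) (R : List Int) (hR : R ≠ []) :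
    ((R.flatMap (fun _ => b)).foldl (pvStepG P) PySem.Dict.empty)
      = b.foldl (pvStepG P) PySem.Dict.empty := by
  obtain ⟨r, R', rfl⟩ := List.exists_cons_of_ne_nil hR
  simp only [List.flatMap_cons, List.foldl_append]
  exact foldl_stepG_flatMap_noop P b R' _ (contains_after_pass P b PySem.Dict.empty)

-- B's single combined pass, characterised: the kept list (built in reverse) reads its
-- indices from the FINAL dict
lemma foldB_eq (P : Int × Int × Int → Prop) [DecidablePred P]
    (l : List (Int × Int × Int)) (k : List (Int × Int × Int)) (d : PySem.Dict Int Int) :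
    l.foldl (fun (p : List (Int × Int × Int) × PySem.Dict Int Int) x =>
        if P x then
          ((x.1, x.2.1, PySem.Dict.getD (if p.2.contains x.2.2 then p.2 else p.2.insert x.2.2 (p.2.size : Int)) x.2.2 0) :: p.1,
           if p.2.contains x.2.2 then p.2 else p.2.insert x.2.2 (p.2.size : Int))
        else p) (k, d)
      = (((l.filter (fun x => decide (P x))).map
            (fun x => (x.1, x.2.1, PySem.Dict.getD (l.foldl (pvStepG P) d) x.2.2 0))).reverse ++ k,
         l.foldl (pvStepG P) d) := by
  induction l generalizing k d with
  | nil => simp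
  | cons x l ih =>
    simp only [List.foldl_cons, List.filter_cons]
    by_cases hP : P x
    · rw [if_pos hP]
      have hstep : pvStepG P d x = (if d.contains x.2.2 then d else d.insert x.2.2 (d.size : Int)) := by
        unfold pvStepG; rw [if_pos hP]
      rw [hstep, ih]
      have hcont : (if d.contains x.2.2 then d else d.insert x.2.2 (d.size : Int)).contains x.2.2 = true := by
        split_ifs with h2
        · exact h2
        · simp
      have hgetD : PySem.Dict.getD
            (l.foldl (pvStepG P) (if d.contains x.2.2 then d else d.insert x.2.2 (d.size : Int))) x.2.2 0
          = PySem.Dict.getD (if d.contains x.2.2 then d else d.insert x.2.2 (d.size : Int)) x.2.2 0 := by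
        unfold PySem.Dict.getD
        rw [get?_foldl_stepG_stable P l _ _ hcont]
      simp [hP, hgetD]
    · have hstep : pvStepG P d x = d := by unfold pvStepG; rw [if_neg hP]
      rw [if_neg hP, hstep, ih]
      simp [hP]

-- filter distributes over the hop-fold replication
lemma filter_flatMap_const {α : Type} (R : List Int) (b : List α) (p : α → Bool) :
    (R.flatMap (fun _ => b)).filter p = R.flatMap (fun _ => b.filter p) := by
  induction R with
  | nil => rfl
  | cons a R ih => simp [List.filter_append, ih]

-- ===== VERDICT (by name: the statement is the Claim_ definition above) =====
theorem edge_list_py_spec : Claim_equal_edge_list_py := by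
  intro kg n_entity hop _
  unfold Spec_edge_list_py
  simp only [edge_list_py, edge_list_py_alt]
  rw [show ((PySem.List.pyRange 0 n_entity 1).flatMap (fun e => pairsB e ((PySem.Dict.mk kg).getD e [])))
        = pvBase kg n_entity from rfl]
  by_cases hh : hop ≤ 0
  · -- hop ≤ 0 : A builds nothing; B returns ([], 0) directly
    rw [if_pos hh]
    have hRnil : PySem.List.pyRange 0 hop 1 = [] :=
      List.eq_nil_of_length_eq_zero (by rw [PySem.List.length_pyRange_one]; omega)
    rw [elA_eq kg n_entity hop, hRnil]
    simp
  · -- hop > 0 : the replicated structure collapses to one base pass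
    rw [if_neg hh]
    rw [foldB_eq (fun x => hop * PySem.Dict.getD (PySem.Dict.counter ((pvBase kg n_entity).map (fun x => x.2.2))) x.2.2 0 > 1000)
        (pvBase kg n_entity) [] PySem.Dict.empty]
    rw [stepA_eq_stepG (fun x =>
        PySem.Dict.getD ((elA kg n_entity hop).foldl (fun d x => d.modify x.2.2 0 (· + 1)) (PySem.Dict.empty : PySem.Dict Int Int)) x.2.2 0 > 1000)]
    have hfil : (fun (x : Int × Int × Int) => decide
          (PySem.Dict.getD ((elA kg n_entity hop).foldl (fun d x => d.modify x.2.2 0 (· + 1)) (PySem.Dict.empty : PySem.Dict Int Int)) x.2.2 0 > 1000))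
        = fun x => decide (hop * PySem.Dict.getD (PySem.Dict.counter ((pvBase kg n_entity).map (fun x => x.2.2))) x.2.2 0 > 1000) :=
      funext fun x => decide_eq_decide.mpr (condA_iff kg n_entity hop x)
    rw [hfil]
    have hstepQP : pvStepG (fun x =>
          PySem.Dict.getD ((elA kg n_entity hop).foldl (fun d x => d.modify x.2.2 0 (· + 1)) (PySem.Dict.empty : PySem.Dict Int Int)) x.2.2 0 > 1000)
        = pvStepG (fun x => hop * PySem.Dict.getD (PySem.Dict.counter ((pvBase kg n_entity).map (fun x => x.2.2))) x.2.2 0 > 1000) := by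
      funext d x
      unfold pvStepG
      exact if_congr (condA_iff kg n_entity hop x) rfl rfl
    rw [hstepQP]
    rw [elA_eq kg n_entity hop]
    have hRne : PySem.List.pyRange 0 hop 1 ≠ [] := by
      intro h
      have h2 := PySem.List.length_pyRange_one 0 hop
      rw [h] at h2
      simp at h2
      omega
    rw [foldl_stepG_flatMap_const _ (pvBase kg n_entity) _ hRne]
    rw [filter_flatMap_const, List.map_flatMap]
    simp
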